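-- pv_equiv track=rewrite | github.com/mfranck340/advent-of-code | 2024/Day9/part_two.py | compact_disk_v2
-- ===== SOURCE A (Python) =====
-- def compact_disk_v2(disk_blocks):
--     """Compact the disk blocks by moving whole files to the leftmost free space."""
--     # Get a list of file IDs and their positions
--     file_positions = {}
--     for pos, block in enumerate(disk_blocks):
--         if block != '.':
--             file_positions.setdefault(block, []).append(pos)
--
--     # Process files in decreasing order of file ID
--     for file_id in sorted(file_positions.keys(), reverse=True):
--         positions = file_positions[file_id]
--         file_length = len(positions)
--
--         # Find the leftmost free span that can fit this file
--         span_start = None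
--         free_count = 0
--         for pos, block in enumerate(disk_blocks):
--             if block == '.':
--                 free_count += 1
--                 if span_start is None:
--                     span_start = pos
--                 if free_count == file_length:
--                     break
--             else:
--                 span_start = None
--                 free_count = 0
--
--         # If we found a valid span, move the file
--         if free_count == file_length and span_start < positions[0]:
--             # Clear the current positions of the file
--             for pos in positions:
--                 disk_blocks[pos] = '.'
--
--             # Place the file in the new span
--             for i in range(file_length):
--                 disk_blocks[span_start + i] = file_id
--
--     return disk_blocks
-- ===== SOURCE B (Python) =====
-- def compact_disk_v2(disk_blocks):
--     """Compact the disk blocks by moving whole files to the leftmost free space.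
--
--     Like A this mutates disk_blocks in place and returns it.  Instead of
--     rescanning the whole disk for every file, it maintains a sorted list of
--     free positions incrementally: the leftmost fitting span is found by
--     scanning only the free cells, and moves update the free list in place.
--     """
--     file_positions = {}
--     free = []
--     for pos, block in enumerate(disk_blocks):
--         if block == '.':
--             free.append(pos)
--         else:
--             file_positions.setdefault(block, []).append(pos)
--
--     for file_id in sorted(file_positions.keys(), reverse=True):
--         positions = file_positions[file_id]
--         length = len(positions)
--         span = _find_span(free, length)
--         if span is not None and span < positions[0]:
--             for pos in positions:
--                 disk_blocks[pos] = '.'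
--                 _insert_sorted(free, pos)
--             for i in range(length):
--                 disk_blocks[span + i] = file_id
--                 free.remove(span + i)
--     return disk_blocks
--
--
-- def _find_span(free, length):
--     """Start of the leftmost run of `length` consecutive free cells, or None."""
--     run_start = run_len = 0
--     for p in free:
--         if run_len > 0 and p == run_start + run_len:
--             run_len += 1
--         else:
--             run_start, run_len = p, 1
--         if run_len == length:
--             return run_start
--     return None
--
--
-- def _insert_sorted(free, pos):
--     i = 0
--     while i < len(free) and free[i] < pos:
--         i += 1
--     free.insert(i, pos)
-- ===== Notes on version B (the rewrite author's own statement) =====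
-- stated objective: faster
-- what changed: Instead of rescanning the entire disk for every file as A does, B builds the sorted list of free positions once and maintains it incrementally (insert freed cells, remove filled cells), so each span search scans only the free cells.
import Mathlib
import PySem

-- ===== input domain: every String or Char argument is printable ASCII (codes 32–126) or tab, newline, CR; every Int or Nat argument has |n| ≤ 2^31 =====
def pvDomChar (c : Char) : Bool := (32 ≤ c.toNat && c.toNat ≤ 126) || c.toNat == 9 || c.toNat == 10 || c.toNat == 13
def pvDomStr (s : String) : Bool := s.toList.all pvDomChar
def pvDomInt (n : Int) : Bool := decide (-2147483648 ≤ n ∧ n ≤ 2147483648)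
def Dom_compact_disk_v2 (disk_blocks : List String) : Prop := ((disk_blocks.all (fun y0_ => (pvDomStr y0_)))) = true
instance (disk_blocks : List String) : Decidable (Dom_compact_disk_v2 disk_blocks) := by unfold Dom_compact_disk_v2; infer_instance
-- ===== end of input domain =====

-- B replaces A's full-disk rescan per file by an incrementally maintained sorted list of free
-- positions (the span search touches only free cells); in Python both A and B mutate the
-- disk_blocks argument in place the same way — the theorems below are about the returned value.

-- ===== PORT A =====

-- file_positions: setdefault(block, []).append(pos) over enumerate(disk_blocks)
def pvBuildPositions (disk : List String) : PySem.Dict String (List Int) :=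
  (PySem.List.enumerate disk 0).foldl
    (fun fp pb => if pb.2 ≠ "." then fp.modify pb.2 [] (· ++ [pb.1]) else fp)
    PySem.Dict.empty

-- A's inner scan: state (span_start, free_count), break when free_count == file_length
def pvScanSpan (L : Int) : List (Int × String) → Option Int → Int → (Option Int × Int)
  | [], ss, fc => (ss, fc)
  | (pos, b) :: rest, ss, fc =>
    if b = "." then
      let fc' := fc + 1
      let ss' := match ss with | none => some pos | some s => some s
      if fc' = L then (ss', fc') else pvScanSpan L rest ss' fc'
    else pvScanSpan L rest none 0

-- one iteration of A's outer loop (the body run for one file_id)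
def pvStepA (fpd : PySem.Dict String (List Int)) (d : List String) (fid : String) : List String :=
  let positions := fpd.getD fid []
  let L : Int := (positions.length : Int)
  let sf := pvScanSpan L (PySem.List.enumerate d 0) none 0
  if sf.2 = L then
    match sf.1, positions with
    | some s, p0 :: _ =>
      if s < p0 then
        let d1 := positions.foldl (fun d p => d.set p.toNat ".") d
        (PySem.List.pyRange 0 L 1).foldl (fun d i => d.set (s + i).toNat fid) d1
      else d
    | _, _ => d
  else d

def compact_disk_v2 (disk_blocks : List String) : List String :=
  let fpd := pvBuildPositions disk_blocks
  (PySem.List.sorted fpd.keys (fun k => k) true).foldl (pvStepA fpd) disk_blocks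

-- ===== PORT B =====

-- B's single pass building file_positions and the sorted free-position list together
def pvBuildB (disk : List String) : PySem.Dict String (List Int) × List Int :=
  (PySem.List.enumerate disk 0).foldl
    (fun st pb => if pb.2 = "." then (st.1, st.2 ++ [pb.1])
                  else (st.1.modify pb.2 [] (· ++ [pb.1]), st.2))
    (PySem.Dict.empty, [])

-- _find_span: start of the leftmost run of `length` consecutive free cells
def pvFindSpan (L : Int) : List Int → Int → Int → Option Int
  | [], _, _ => none
  | p :: rest, rs, rl =>
    let rr := if 0 < rl ∧ p = rs + rl then (rs, rl + 1) else (p, 1)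
    if rr.2 = L then some rr.1 else pvFindSpan L rest rr.1 rr.2

-- _insert_sorted
def pvInsertSorted (p : Int) : List Int → List Int
  | [] => [p]
  | x :: xs => if x < p then x :: pvInsertSorted p xs else p :: x :: xs

-- one iteration of B's outer loop: state (disk, free)
def pvStepB (fpd : PySem.Dict String (List Int)) (st : List String × List Int) (fid : String) :
    List String × List Int :=
  let positions := fpd.getD fid []
  let L : Int := (positions.length : Int)
  match pvFindSpan L st.2 0 0, positions with
  | some s, p0 :: _ =>
    if s < p0 then
      let st1 := positions.foldl (fun st p => (st.1.set p.toNat ".", pvInsertSorted p st.2)) st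
      (PySem.List.pyRange 0 L 1).foldl
        (fun st i => (st.1.set (s + i).toNat fid, st.2.erase (s + i))) st1
    else st
  | _, _ => st

def compact_disk_v2_alt (disk_blocks : List String) : List String :=
  let bf := pvBuildB disk_blocks
  ((PySem.List.sorted bf.1.keys (fun k => k) true).foldl (pvStepB bf.1) (disk_blocks, bf.2)).1

-- ===== PRECONDITION & SPEC =====
def Spec_compact_disk_v2 (disk_blocks : List String) (out : List String) : Prop := out = compact_disk_v2_alt disk_blocks
instance (disk_blocks : List String) (out : List String) : Decidable (Spec_compact_disk_v2 disk_blocks out) := by unfold Spec_compact_disk_v2; infer_instance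

-- ===== CLAIM (what is proved, stated in full; the proofs are below) =====
def Claim_equal_compact_disk_v2 : Prop := ∀ (disk_blocks : List String), Dom_compact_disk_v2 disk_blocks → Spec_compact_disk_v2 disk_blocks (compact_disk_v2 disk_blocks)

-- ===== LEMMAS AND PROOFS =====

-- sorted list of the free ('.') positions of the disk, indices starting at i — the proof-side
-- abstraction tying B's incremental free list to the current disk
def pvFP : List String → Int → List Int
  | [], _ => []
  | b :: r, i => if b = "." then i :: pvFP r (i + 1) else pvFP r (i + 1)

theorem pvFP_lb : ∀ (d : List String) (i : Int), ∀ x ∈ pvFP d i, i ≤ x := by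
  intro d
  induction d with
  | nil => intro i x hx; simp [pvFP] at hx
  | cons b r ih =>
    intro i x hx
    simp only [pvFP] at hx
    split at hx
    · rcases List.mem_cons.1 hx with h | h
      · omega
      · have := ih (i+1) x h; omega
    · have := ih (i+1) x hx; omega

theorem pvFP_mem : ∀ (d : List String) (i x : Int),
    x ∈ pvFP d i ↔ ∃ k : Nat, k < d.length ∧ x = i + k ∧ d[k]! = "." := by
  intro d
  induction d with
  | nil => intro i x; simp [pvFP]
  | cons b r ih =>
    intro i x
    simp only [pvFP]
    constructor
    · intro hx
      split at hx
      · rcases List.mem_cons.1 hx with h | h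
        · exact ⟨0, by simp, by omega, by simpa⟩
        · obtain ⟨k, hk, hxk, hd⟩ := (ih (i+1) x).1 h
          exact ⟨k+1, by simpa using hk, by push_cast; omega, by simpa using hd⟩
      · obtain ⟨k, hk, hxk, hd⟩ := (ih (i+1) x).1 hx
        exact ⟨k+1, by simpa using hk, by push_cast; omega, by simpa using hd⟩
    · rintro ⟨k, hk, hxk, hd⟩
      cases k with
      | zero =>
        simp at hd
        simp [hd, List.mem_cons]
        left; omega
      | succ k =>
        have hmem : x ∈ pvFP r (i+1) := (ih (i+1) x).2 ⟨k, by simpa using hk, by omega, by simpa using hd⟩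
        split
        · exact List.mem_cons_of_mem _ hmem
        · exact hmem

theorem pvInsertSorted_of_lt (p : Int) (l : List Int) (h : ∀ x ∈ l, p < x) :
    pvInsertSorted p l = p :: l := by
  cases l with
  | nil => rfl
  | cons x xs =>
    have : ¬ x < p := by have := h x (by simp); omega
    simp [pvInsertSorted, this]

theorem pvFP_set_dot : ∀ (d : List String) (q : Nat) (i : Int), q < d.length → d[q]! ≠ "." →
    pvFP (d.set q ".") i = pvInsertSorted (i + q) (pvFP d i) := by
  intro d
  induction d with
  | nil => intro q i h; simp at h
  | cons b r ih =>
    intro q i hq hne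
    cases q with
    | zero =>
      simp only [List.set]
      simp at hne
      rw [show pvFP ("." :: r) i = i :: pvFP r (i+1) by simp [pvFP]]
      rw [show pvFP (b :: r) i = pvFP r (i+1) by simp [pvFP, hne]]
      rw [pvInsertSorted_of_lt _ _ (fun x hx => by have := pvFP_lb r (i+1) x hx; omega)]
      norm_num
    | succ q =>
      simp only [List.set]
      have hq' : q < r.length := by simpa using hq
      have hne' : r[q]! ≠ "." := by simpa using hne
      by_cases hb : b = "."
      · subst hb
        rw [show pvFP ("." :: r.set q ".") i = i :: pvFP (r.set q ".") (i+1) by simp [pvFP]]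
        rw [show pvFP ("." :: r) i = i :: pvFP r (i+1) by simp [pvFP]]
        rw [ih q (i+1) hq' hne']
        rw [show pvInsertSorted (i + ((q:Nat)+1 : Nat)) (i :: pvFP r (i+1)) = i :: pvInsertSorted (i + ((q:Nat)+1 : Nat)) (pvFP r (i+1)) by
          simp only [pvInsertSorted]
          rw [if_pos (by push_cast; omega)]]
        congr 1
        push_cast
        ring_nf
      · rw [show pvFP (b :: r.set q ".") i = pvFP (r.set q ".") (i+1) by simp [pvFP, hb]]
        rw [show pvFP (b :: r) i = pvFP r (i+1) by simp [pvFP, hb]]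
        rw [ih q (i+1) hq' hne']
        push_cast
        ring_nf

theorem pvFP_set_fill : ∀ (d : List String) (q : Nat) (i : Int) (v : String), q < d.length →
    d[q]! = "." → v ≠ "." →
    pvFP (d.set q v) i = (pvFP d i).erase (i + q) := by
  intro d
  induction d with
  | nil => intro q i v h; simp at h
  | cons b r ih =>
    intro q i v hq hdot hv
    cases q with
    | zero =>
      simp only [List.set]
      simp at hdot
      subst hdot
      rw [show pvFP (v :: r) i = pvFP r (i+1) by simp [pvFP, hv]]
      rw [show pvFP ("." :: r) i = i :: pvFP r (i+1) by simp [pvFP]]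
      simp
    | succ q =>
      simp only [List.set]
      have hq' : q < r.length := by simpa using hq
      have hdot' : r[q]! = "." := by simpa using hdot
      by_cases hb : b = "."
      · subst hb
        rw [show pvFP ("." :: r.set q v) i = i :: pvFP (r.set q v) (i+1) by simp [pvFP]]
        rw [show pvFP ("." :: r) i = i :: pvFP r (i+1) by simp [pvFP]]
        rw [ih q (i+1) v hq' hdot' hv]
        rw [List.erase_cons]
        rw [if_neg (by simp; omega)]
        congr 1
        push_cast; ring_nf
      · rw [show pvFP (b :: r.set q v) i = pvFP (r.set q v) (i+1) by simp [pvFP, hb]]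
        rw [show pvFP (b :: r) i = pvFP r (i+1) by simp [pvFP, hb]]
        rw [ih q (i+1) v hq' hdot' hv]
        congr 1
        push_cast; ring_nf

theorem pvScan_eq_findSpan : ∀ (d : List String) (i : Int) (ss : Option Int) (fc rs rl L : Int),
    0 < L → fc < L →
    ((fc = 0 ∧ ss = none ∧ (rl = 0 ∨ (0 < rl ∧ rs + rl < i))) ∨
     (0 < fc ∧ ss = some rs ∧ fc = rl ∧ i = rs + rl)) →
    (if (pvScanSpan L (PySem.List.enumerate d i) ss fc).2 = L
       then (pvScanSpan L (PySem.List.enumerate d i) ss fc).1 else none)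
     = pvFindSpan L (pvFP d i) rs rl := by
  intro d
  induction d with
  | nil =>
    intro i ss fc rs rl L hL hfc hrel
    simp [PySem.List.enumerate_nil, pvScanSpan, pvFP, pvFindSpan]
    omega
  | cons b r ih =>
    intro i ss fc rs rl L hL hfc hrel
    rw [PySem.List.enumerate_cons]
    by_cases hb : b = "."
    · subst hb
      rw [show pvFP ("." :: r) i = i :: pvFP r (i+1) by simp [pvFP]]
      rcases hrel with ⟨h0, hnone, hrl⟩ | ⟨hpos, hsome, hfcrl, hi⟩
      · subst hnone
        rw [show pvScanSpan L ((i, ".") :: PySem.List.enumerate r (i+1)) none fc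
              = (if fc + 1 = L then (some i, fc + 1)
                 else pvScanSpan L (PySem.List.enumerate r (i+1)) (some i) (fc + 1)) by
              simp only [pvScanSpan]; norm_num]
        simp only [pvFindSpan]
        rw [if_neg (by omega : ¬ (0 < rl ∧ i = rs + rl))]
        rw [h0]
        simp only [zero_add]
        by_cases h1 : (1:Int) = L
        · rw [if_pos h1, if_pos h1]
          simp [h1]
        · rw [if_neg h1, if_neg h1]
          have := ih (i+1) (some i) 1 i 1 L hL (by omega)
            (Or.inr ⟨by omega, rfl, rfl, by omega⟩)
          simpa [h1] using this
      · subst hsome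
        rw [show pvScanSpan L ((i, ".") :: PySem.List.enumerate r (i+1)) (some rs) fc
              = (if fc + 1 = L then (some rs, fc + 1)
                 else pvScanSpan L (PySem.List.enumerate r (i+1)) (some rs) (fc + 1)) by
              simp only [pvScanSpan]; norm_num]
        simp only [pvFindSpan]
        rw [if_pos (⟨by omega, by omega⟩ : (0 < rl ∧ i = rs + rl))]
        rw [show fc + 1 = rl + 1 by omega]
        by_cases h1 : rl + 1 = L
        · rw [if_pos h1, if_pos h1]
          simp [h1]
        · rw [if_neg h1, if_neg h1]
          have := ih (i+1) (some rs) (rl + 1) rs (rl + 1) L hL (by omega)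
            (Or.inr ⟨by omega, rfl, rfl, by omega⟩)
          simpa [h1] using this
    · rw [show pvFP (b :: r) i = pvFP r (i+1) by simp [pvFP, hb]]
      rw [show pvScanSpan L ((i, b) :: PySem.List.enumerate r (i+1)) ss fc
            = pvScanSpan L (PySem.List.enumerate r (i+1)) none 0 by
            simp [pvScanSpan, hb]]
      apply ih (i+1) none 0 rs rl L hL hL
      left
      refine ⟨rfl, rfl, ?_⟩
      rcases hrel with ⟨h0, hnone, hrl⟩ | ⟨hpos, hsome, hfcrl, hi⟩
      · rcases hrl with h | h
        · left; exact h
        · right; omega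
      · right; omega

theorem pvFindSpan_mem (P : Int → Prop) : ∀ (free : List Int) (L rs rl s : Int),
    (∀ p ∈ free, P p) → (∀ j : Int, 0 ≤ j → j < rl → P (rs + j)) →
    pvFindSpan L free rs rl = some s → ∀ j : Int, 0 ≤ j → j < L → P (s + j) := by
  intro free
  induction free with
  | nil => intro L rs rl s hall hrun h; simp [pvFindSpan] at h
  | cons p rest ih =>
    intro L rs rl s hall hrun h
    simp only [pvFindSpan] at h
    by_cases hc : 0 < rl ∧ p = rs + rl
    · rw [if_pos hc] at h
      have hrun' : ∀ j : Int, 0 ≤ j → j < rl + 1 → P (rs + j) := by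
        intro j hj hjlt
        by_cases hje : j = rl
        · subst hje; rw [← hc.2]; exact hall p (by simp)
        · exact hrun j hj (by omega)
      simp only at h
      by_cases hL : rl + 1 = L
      · rw [if_pos hL] at h
        cases h
        intro j hj hjlt
        exact hrun' j hj (by omega)
      · rw [if_neg hL] at h
        exact ih L rs (rl + 1) s (fun q hq => hall q (by simp [hq])) hrun' h
    · rw [if_neg hc] at h
      have hrun' : ∀ j : Int, 0 ≤ j → j < 1 → P (p + j) := by
        intro j hj hjlt
        have : j = 0 := by omega
        subst this
        simpa using hall p (by simp)
      simp only at h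
      by_cases hL : (1:Int) = L
      · rw [if_pos hL] at h
        cases h
        intro j hj hjlt
        exact hrun' j hj (by omega)
      · rw [if_neg hL] at h
        exact ih L p 1 s (fun q hq => hall q (by simp [hq])) hrun' h

theorem pvClear_length : ∀ (ps : List Int) (d : List String) (v : String),
    (ps.foldl (fun d p => d.set p.toNat v) d).length = d.length := by
  intro ps
  induction ps with
  | nil => intro d v; rfl
  | cons p rest ih => intro d v; rw [List.foldl_cons, ih, List.length_set]

theorem pvClear_get : ∀ (ps : List Int) (d : List String) (v : String) (q : Nat), q < d.length →
    (ps.foldl (fun d p => d.set p.toNat v) d)[q]! = if ∃ p ∈ ps, p.toNat = q then v else d[q]! := by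
  intro ps
  induction ps with
  | nil => intro d v q hq; simp
  | cons p rest ih =>
    intro d v q hq
    rw [List.foldl_cons, ih _ _ _ (by rw [List.length_set]; exact hq)]
    by_cases hpq : p.toNat = q
    · subst hpq
      rw [if_pos (⟨p, by simp, rfl⟩ : ∃ x ∈ p :: rest, x.toNat = p.toNat)]
      split
      · rfl
      · rw [List.getElem!_eq_getElem?_getD, List.getElem?_set_self (by exact hq)]
        simp
    · rw [show (d.set p.toNat v)[q]! = d[q]! by
        rw [List.getElem!_eq_getElem?_getD, List.getElem!_eq_getElem?_getD,
          List.getElem?_set_ne hpq]]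
      by_cases hex : ∃ x ∈ rest, x.toNat = q
      · rw [if_pos hex, if_pos (by obtain ⟨x, hx, hxq⟩ := hex; exact ⟨x, by simp [hx], hxq⟩)]
      · rw [if_neg hex, if_neg (by
          rintro ⟨x, hx, hxq⟩
          rcases List.mem_cons.1 hx with h | h
          · exact hpq (h ▸ hxq)
          · exact hex ⟨x, h, hxq⟩)]

theorem pvClearPair : ∀ (ps : List Int) (d : List String) (k : String), k ≠ "." →
    (∀ p ∈ ps, 0 ≤ p ∧ p.toNat < d.length ∧ d[p.toNat]! = k) → ps.Pairwise (· ≠ ·) →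
    ps.foldl (fun st p => (st.1.set p.toNat ".", pvInsertSorted p st.2)) (d, pvFP d 0)
      = (ps.foldl (fun d p => d.set p.toNat ".") d,
         pvFP (ps.foldl (fun d p => d.set p.toNat ".") d) 0) := by
  intro ps
  induction ps with
  | nil => intro d k hk hps hpw; rfl
  | cons p rest ih =>
    intro d k hk hps hpw
    obtain ⟨hp0, hplt, hpk⟩ := hps p (by simp)
    rw [List.foldl_cons, List.foldl_cons]
    have hfp : pvInsertSorted p (pvFP d 0) = pvFP (d.set p.toNat ".") 0 := by
      rw [pvFP_set_dot d p.toNat 0 hplt (by rw [hpk]; exact hk)]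
      congr 1
      omega
    rw [hfp]
    exact ih (d.set p.toNat ".") k hk
      (by
        intro x hx
        obtain ⟨hx0, hxlt, hxk⟩ := hps x (by simp [hx])
        refine ⟨hx0, by rw [List.length_set]; exact hxlt, ?_⟩
        have hne : p.toNat ≠ x.toNat := by
          have := (List.pairwise_cons.1 hpw).1 x hx
          omega
        rw [List.getElem!_eq_getElem?_getD, List.getElem?_set_ne hne,
          ← List.getElem!_eq_getElem?_getD]
        exact hxk)
      (List.pairwise_cons.1 hpw).2

theorem pvFillPair : ∀ (n : Nat) (a L s : Int) (d : List String) (fid : String),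
    (L - a).toNat = n → fid ≠ "." → 0 ≤ s → 0 ≤ a →
    (∀ j : Int, a ≤ j → j < L → (s+j).toNat < d.length ∧ d[(s+j).toNat]! = ".") →
    (PySem.List.pyRange a L 1).foldl (fun st i => (st.1.set (s+i).toNat fid, st.2.erase (s+i)))
        (d, pvFP d 0)
      = ((PySem.List.pyRange a L 1).foldl (fun d i => d.set (s+i).toNat fid) d,
         pvFP ((PySem.List.pyRange a L 1).foldl (fun d i => d.set (s+i).toNat fid) d) 0) := by
  intro n
  induction n with
  | zero =>
    intro a L s d fid hn hfid hs ha hcells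
    rw [PySem.List.pyRange_one_eq_nil (by omega)]
    rfl
  | succ m ih =>
    intro a L s d fid hn hfid hs ha hcells
    rw [PySem.List.pyRange_one_cons (by omega)]
    rw [List.foldl_cons, List.foldl_cons]
    obtain ⟨halt, hadot⟩ := hcells a (le_refl a) (by omega)
    have hfp : (pvFP d 0).erase (s + a) = pvFP (d.set (s+a).toNat fid) 0 := by
      rw [pvFP_set_fill d (s+a).toNat 0 fid halt hadot hfid]
      congr 1
      omega
    rw [hfp]
    exact ih (a+1) L s (d.set (s+a).toNat fid) fid (by omega) hfid hs (by omega)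
      (by
        intro j hj hjL
        obtain ⟨hlt, hdot⟩ := hcells j (by omega) hjL
        have hne : (s+a).toNat ≠ (s+j).toNat := by omega
        refine ⟨by rw [List.length_set]; exact hlt, ?_⟩
        rw [List.getElem!_eq_getElem?_getD, List.getElem?_set_ne hne,
          ← List.getElem!_eq_getElem?_getD]
        exact hdot)

theorem pvStep_eq (fpd : PySem.Dict String (List Int)) (d : List String) (k : String)
    (hk : k ≠ ".")
    (hne : fpd.getD k [] ≠ [])
    (hpw : (fpd.getD k []).Pairwise (· < ·))
    (hcells : ∀ p ∈ fpd.getD k [], 0 ≤ p ∧ p.toNat < d.length ∧ d[p.toNat]! = k) :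
    pvStepB fpd (d, pvFP d 0) k = (pvStepA fpd d k, pvFP (pvStepA fpd d k) 0) := by
  obtain ⟨p0, pt, heq⟩ : ∃ p0 pt, fpd.getD k [] = p0 :: pt := by
    cases h : fpd.getD k [] with
    | nil => exact absurd h hne
    | cons a b => exact ⟨a, b, rfl⟩
  have hL : (0:Int) < ((fpd.getD k []).length : Int) := by rw [heq]; simp
  have hscan := pvScan_eq_findSpan d 0 none 0 0 0 ((fpd.getD k []).length : Int) hL hL
    (Or.inl ⟨rfl, rfl, Or.inl rfl⟩)
  simp only [pvStepA, pvStepB]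
  rw [heq] at hscan hpw hcells ⊢
  cases hfs : pvFindSpan (((p0 :: pt).length : Nat) : Int) (pvFP d 0) 0 0 with
  | none =>
    rw [hfs] at hscan
    by_cases hc : (pvScanSpan (((p0 :: pt).length : Nat) : Int) (PySem.List.enumerate d 0) none 0).2
        = (((p0 :: pt).length : Nat) : Int)
    · rw [if_pos hc] at hscan ⊢
      rw [hscan]
    · rw [if_neg hc]
  | some s =>
    rw [hfs] at hscan
    have hsf2 : (pvScanSpan (((p0 :: pt).length : Nat) : Int) (PySem.List.enumerate d 0) none 0).2
        = (((p0 :: pt).length : Nat) : Int) := by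
      by_contra hc
      rw [if_neg hc] at hscan
      simp at hscan
    rw [if_pos hsf2] at hscan ⊢
    rw [hscan]
    dsimp only
    by_cases hsp : s < p0
    · simp only [if_pos hsp]
      have hspan : ∀ j : Int, 0 ≤ j → j < (((p0 :: pt).length : Nat) : Int) → (s + j) ∈ pvFP d 0 :=
        pvFindSpan_mem (fun x => x ∈ pvFP d 0) (pvFP d 0) _ 0 0 s (fun p hp => hp)
          (by intro j h1 h2; omega) hfs
      have hfree : ∀ j : Int, 0 ≤ j → j < (((p0 :: pt).length : Nat) : Int) →
          0 ≤ s + j ∧ (s + j).toNat < d.length ∧ d[(s + j).toNat]! = "." := by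
        intro j h1 h2
        obtain ⟨kk, hkk, hkeq, hdot⟩ := (pvFP_mem d 0 (s + j)).1 (hspan j h1 h2)
        have h0 : (0:Int) + (kk : Int) = (kk : Int) := by omega
        rw [h0] at hkeq
        refine ⟨by omega, by omega, ?_⟩
        rw [show (s + j).toNat = kk by omega]
        exact hdot
      rw [pvClearPair (p0 :: pt) d k hk hcells (hpw.imp (fun h => ne_of_lt h))]
      exact pvFillPair (p0 :: pt).length 0 (((p0 :: pt).length : Nat) : Int) s
        ((p0 :: pt).foldl (fun d p => d.set p.toNat ".") d) k (by omega) hk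
        (by
          have := (hfree 0 (le_refl 0) (by simp)).1
          omega)
        (le_refl 0)
        (by
          intro j h1 h2
          obtain ⟨hsj, hlt, hdot⟩ := hfree j h1 h2
          refine ⟨by rw [pvClear_length]; exact hlt, ?_⟩
          rw [pvClear_get (p0 :: pt) d "." (s + j).toNat hlt]
          split
          · rfl
          · exact hdot)
    · simp only [if_neg hsp]

theorem pvFill_length : ∀ (js : List Int) (s : Int) (v : String) (d : List String),
    (js.foldl (fun d i => d.set (s+i).toNat v) d).length = d.length := by
  intro js
  induction js with
  | nil => intro s v d; rfl
  | cons j rest ih => intro s v d; rw [List.foldl_cons, ih, List.length_set]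

theorem pvFill_get : ∀ (js : List Int) (s : Int) (v : String) (d : List String) (q : Nat),
    q < d.length →
    (js.foldl (fun d i => d.set (s+i).toNat v) d)[q]!
      = if ∃ j ∈ js, (s+j).toNat = q then v else d[q]! := by
  intro js
  induction js with
  | nil => intro s v d q hq; simp
  | cons j rest ih =>
    intro s v d q hq
    rw [List.foldl_cons, ih _ _ _ _ (by rw [List.length_set]; exact hq)]
    by_cases hpq : (s+j).toNat = q
    · subst hpq
      rw [if_pos (⟨j, by simp, rfl⟩ : ∃ x ∈ j :: rest, (s+x).toNat = (s+j).toNat)]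
      split
      · rfl
      · rw [List.getElem!_eq_getElem?_getD, List.getElem?_set_self (by exact hq)]
        simp
    · rw [show (d.set (s+j).toNat v)[q]! = d[q]! by
        rw [List.getElem!_eq_getElem?_getD, List.getElem!_eq_getElem?_getD,
          List.getElem?_set_ne hpq]]
      by_cases hex : ∃ x ∈ rest, (s+x).toNat = q
      · rw [if_pos hex, if_pos (by obtain ⟨x, hx, hxq⟩ := hex; exact ⟨x, by simp [hx], hxq⟩)]
      · rw [if_neg hex, if_neg (by
          rintro ⟨x, hx, hxq⟩
          rcases List.mem_cons.1 hx with h | h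
          · exact hpq (h ▸ hxq)
          · exact hex ⟨x, h, hxq⟩)]

theorem pvStepA_pres (fpd : PySem.Dict String (List Int)) (d : List String) (k : String)
    (_hk : k ≠ ".")
    (hne : fpd.getD k [] ≠ [])
    (hcells : ∀ p ∈ fpd.getD k [], 0 ≤ p ∧ p.toNat < d.length ∧ d[p.toNat]! = k) :
    (pvStepA fpd d k).length = d.length ∧
    (∀ q : Nat, q < d.length → d[q]! ≠ "." → d[q]! ≠ k → (pvStepA fpd d k)[q]! = d[q]!) := by
  obtain ⟨p0, pt, heq⟩ : ∃ p0 pt, fpd.getD k [] = p0 :: pt := by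
    cases h : fpd.getD k [] with
    | nil => exact absurd h hne
    | cons a b => exact ⟨a, b, rfl⟩
  have hL : (0:Int) < ((fpd.getD k []).length : Int) := by rw [heq]; simp
  have hscan := pvScan_eq_findSpan d 0 none 0 0 0 ((fpd.getD k []).length : Int) hL hL
    (Or.inl ⟨rfl, rfl, Or.inl rfl⟩)
  simp only [pvStepA]
  rw [heq] at hscan hcells ⊢
  by_cases hc : (pvScanSpan (((p0 :: pt).length : Nat) : Int) (PySem.List.enumerate d 0) none 0).2
      = (((p0 :: pt).length : Nat) : Int)
  · rw [if_pos hc] at hscan ⊢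
    cases hs1 : (pvScanSpan (((p0 :: pt).length : Nat) : Int) (PySem.List.enumerate d 0) none 0).1 with
    | none => exact ⟨rfl, fun q hq h1 h2 => rfl⟩
    | some s =>
      rw [hs1] at hscan
      dsimp only
      by_cases hsp : s < p0
      · simp only [if_pos hsp]
        have hspan : ∀ j : Int, 0 ≤ j → j < (((p0 :: pt).length : Nat) : Int) →
            (s + j) ∈ pvFP d 0 :=
          pvFindSpan_mem (fun x => x ∈ pvFP d 0) (pvFP d 0) _ 0 0 s (fun p hp => hp)
            (by intro j h1 h2; omega) hscan.symm
        have hfree : ∀ j : Int, 0 ≤ j → j < (((p0 :: pt).length : Nat) : Int) →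
            0 ≤ s + j ∧ (s + j).toNat < d.length ∧ d[(s + j).toNat]! = "." := by
          intro j h1 h2
          obtain ⟨kk, hkk, hkeq, hdot⟩ := (pvFP_mem d 0 (s + j)).1 (hspan j h1 h2)
          have h0 : (0:Int) + (kk : Int) = (kk : Int) := by omega
          rw [h0] at hkeq
          refine ⟨by omega, by omega, ?_⟩
          rw [show (s + j).toNat = kk by omega]
          exact hdot
        constructor
        · rw [pvFill_length, pvClear_length]
        · intro q hq h1 h2
          rw [pvFill_get _ _ _ _ q (by rw [pvClear_length]; exact hq)]
          rw [if_neg (by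
            rintro ⟨j, hj, hjq⟩
            rw [PySem.List.mem_pyRange_one] at hj
            obtain ⟨_, _, hdot⟩ := hfree j hj.1 hj.2
            rw [hjq] at hdot
            exact h1 hdot)]
          rw [pvClear_get _ _ _ q hq]
          rw [if_neg (by
            rintro ⟨p, hp, hpq⟩
            obtain ⟨_, _, hpk⟩ := hcells p hp
            rw [hpq] at hpk
            exact h2 hpk)]
      · simp only [if_neg hsp]
        exact ⟨trivial, fun q hq h1 h2 => trivial⟩
  · rw [if_neg hc]
    exact ⟨rfl, fun q hq h1 h2 => rfl⟩

theorem pvLoop_eq : ∀ (ks : List String) (fpd : PySem.Dict String (List Int)) (d : List String),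
    ks.Nodup →
    (∀ k ∈ ks, k ≠ "." ∧ fpd.getD k [] ≠ [] ∧ (fpd.getD k []).Pairwise (· < ·)) →
    (∀ k ∈ ks, ∀ p ∈ fpd.getD k [], 0 ≤ p ∧ p.toNat < d.length ∧ d[p.toNat]! = k) →
    (ks.foldl (pvStepB fpd) (d, pvFP d 0)).1 = ks.foldl (pvStepA fpd) d := by
  intro ks
  induction ks with
  | nil => intro fpd d _ _ _; rfl
  | cons k rest ih =>
    intro fpd d hnd hstat hcells
    obtain ⟨hk, hne, hpw⟩ := hstat k (by simp)
    have hck := hcells k (by simp)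
    rw [List.foldl_cons, List.foldl_cons, pvStep_eq fpd d k hk hne hpw hck]
    obtain ⟨hlen, hget⟩ := pvStepA_pres fpd d k hk hne hck
    exact ih fpd (pvStepA fpd d k) (List.nodup_cons.1 hnd).2
      (fun k' hk' => hstat k' (by simp [hk']))
      (by
        intro k' hk' p hp
        obtain ⟨hk'dot, _, _⟩ := hstat k' (by simp [hk'])
        obtain ⟨hp0, hplt, hpk⟩ := hcells k' (by simp [hk']) p hp
        refine ⟨hp0, by rw [hlen]; exact hplt, ?_⟩
        rw [hget p.toNat hplt (by rw [hpk]; exact hk'dot)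
          (by rw [hpk]; exact fun hcontra => (List.nodup_cons.1 hnd).1 (hcontra ▸ hk'))]
        exact hpk)

def pvBStep (fp : PySem.Dict String (List Int)) (pb : Int × String) : PySem.Dict String (List Int) :=
  if pb.2 ≠ "." then fp.modify pb.2 [] (· ++ [pb.1]) else fp

theorem pvBuild_getD : ∀ (l : List (Int × String)) (acc : PySem.Dict String (List Int)) (k : String),
    k ≠ "." →
    (l.foldl pvBStep acc).getD k []
      = acc.getD k [] ++ (l.filter (fun pb => pb.2 == k)).map (·.1) := by
  intro l
  induction l with
  | nil => intro acc k hk; simp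
  | cons pb rest ih =>
    intro acc k hk
    rw [List.foldl_cons]
    by_cases hpb : pb.2 = "."
    · rw [show pvBStep acc pb = acc by simp [pvBStep, hpb]]
      rw [ih acc k hk]
      rw [List.filter_cons_of_neg (by simp [hpb]; exact fun h => hk h.symm)]
    · rw [show pvBStep acc pb = acc.modify pb.2 [] (· ++ [pb.1]) by simp [pvBStep, hpb]]
      rw [ih _ k hk]
      rw [PySem.Dict.getD_modify]
      by_cases hkpb : k = pb.2
      · rw [if_pos hkpb, List.filter_cons_of_pos (by simp [hkpb])]
        simp [hkpb]
      · rw [if_neg hkpb, List.filter_cons_of_neg (by simp; intro h; exact hkpb h.symm)]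

theorem pvBuild_keys_sub : ∀ (l : List (Int × String)) (acc : PySem.Dict String (List Int)) (k : String),
    k ∈ (l.foldl pvBStep acc).keys → k ∈ acc.keys ∨ (k ≠ "." ∧ ∃ pb ∈ l, pb.2 = k) := by
  intro l
  induction l with
  | nil => intro acc k h; exact Or.inl h
  | cons pb rest ih =>
    intro acc k h
    rw [List.foldl_cons] at h
    rcases ih _ k h with hacc | ⟨hk, pb', hpb', hpb'2⟩
    · by_cases hdot : pb.2 = "."
      · rw [show pvBStep acc pb = acc by simp [pvBStep, hdot]] at hacc
        exact Or.inl hacc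
      · rw [show pvBStep acc pb = acc.modify pb.2 [] (· ++ [pb.1]) by simp [pvBStep, hdot]] at hacc
        rw [PySem.Dict.keys_modify] at hacc
        rcases (PySem.Dict.mem_keys_insert _ _ _ _).1 hacc with h1 | h1
        · exact Or.inr ⟨h1 ▸ hdot, pb, by simp, h1.symm⟩
        · exact Or.inl h1
    · exact Or.inr ⟨hk, pb', by simp [hpb'], hpb'2⟩

theorem pvBuild_keys_nodup : ∀ (l : List (Int × String)) (acc : PySem.Dict String (List Int)),
    acc.keys.Nodup → (l.foldl pvBStep acc).keys.Nodup := by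
  intro l
  induction l with
  | nil => intro acc h; exact h
  | cons pb rest ih =>
    intro acc h
    rw [List.foldl_cons]
    apply ih
    by_cases hdot : pb.2 = "."
    · rw [show pvBStep acc pb = acc by simp [pvBStep, hdot]]; exact h
    · rw [show pvBStep acc pb = acc.modify pb.2 [] (· ++ [pb.1]) by simp [pvBStep, hdot]]
      rw [PySem.Dict.keys_modify]
      by_cases hc : acc.contains pb.2
      · rw [PySem.Dict.keys_insert_of_contains _ _ hc]; exact h
      · rw [PySem.Dict.keys_insert_of_not_contains _ _ (by simpa using hc)]
        simp only [List.nodup_append]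
        refine ⟨h, by simp, ?_⟩
        intro x hx y hy
        rw [List.mem_singleton] at hy
        subst hy
        intro hxy
        subst hxy
        exact hc ((PySem.Dict.contains_iff_mem_keys acc pb.2).2 hx)

theorem pvBuildB_fst : ∀ (l : List (Int × String)) (dct : PySem.Dict String (List Int)) (fr : List Int),
    (l.foldl (fun st pb => if pb.2 = "." then (st.1, st.2 ++ [pb.1])
                  else (st.1.modify pb.2 [] (· ++ [pb.1]), st.2)) (dct, fr)).1
      = l.foldl pvBStep dct := by
  intro l
  induction l with
  | nil => intro dct fr; rfl
  | cons pb rest ih =>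
    intro dct fr
    rw [List.foldl_cons, List.foldl_cons]
    by_cases hdot : pb.2 = "."
    · rw [show (if pb.2 = "." then (dct, fr ++ [pb.1])
             else (dct.modify pb.2 [] (· ++ [pb.1]), fr)) = (dct, fr ++ [pb.1]) by rw [if_pos hdot]]
      rw [show pvBStep dct pb = dct by simp [pvBStep, hdot]]
      exact ih dct (fr ++ [pb.1])
    · rw [show (if pb.2 = "." then (dct, fr ++ [pb.1])
             else (dct.modify pb.2 [] (· ++ [pb.1]), fr)) = (dct.modify pb.2 [] (· ++ [pb.1]), fr) by
           rw [if_neg hdot]]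
      rw [show pvBStep dct pb = dct.modify pb.2 [] (· ++ [pb.1]) by simp [pvBStep, hdot]]
      exact ih _ fr

theorem pvBuildB_snd : ∀ (d : List String) (i : Int) (dct : PySem.Dict String (List Int)) (fr : List Int),
    ((PySem.List.enumerate d i).foldl (fun st pb => if pb.2 = "." then (st.1, st.2 ++ [pb.1])
                  else (st.1.modify pb.2 [] (· ++ [pb.1]), st.2)) (dct, fr)).2
      = fr ++ pvFP d i := by
  intro d
  induction d with
  | nil => intro i dct fr; simp [PySem.List.enumerate_nil, pvFP]
  | cons b r ih =>
    intro i dct fr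
    rw [PySem.List.enumerate_cons, List.foldl_cons]
    by_cases hdot : b = "."
    · rw [show (if ((i, b) : Int × String).2 = "." then (dct, fr ++ [(i, b).1])
             else (dct.modify (i, b).2 [] (· ++ [(i, b).1]), fr)) = (dct, fr ++ [i]) by
           simp [hdot]]
      rw [ih (i+1) dct (fr ++ [i])]
      rw [show pvFP (b :: r) i = i :: pvFP r (i+1) by simp [pvFP, hdot]]
      simp
    · rw [show (if ((i, b) : Int × String).2 = "." then (dct, fr ++ [(i, b).1])
             else (dct.modify (i, b).2 [] (· ++ [(i, b).1]), fr))
             = (dct.modify b [] (· ++ [i]), fr) by simp [hdot]]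
      rw [ih (i+1) _ fr]
      rw [show pvFP (b :: r) i = pvFP r (i+1) by simp [pvFP, hdot]]

theorem pv_final : ∀ (d : List String), compact_disk_v2 d = compact_disk_v2_alt d := by
  intro d
  have hfst : (pvBuildB d).1 = pvBuildPositions d := pvBuildB_fst _ _ _
  have hsnd : (pvBuildB d).2 = pvFP d 0 := by
    have := pvBuildB_snd d 0 PySem.Dict.empty []
    simpa using this
  show (PySem.List.sorted (pvBuildPositions d).keys (fun k => k) true).foldl
      (pvStepA (pvBuildPositions d)) d
    = ((PySem.List.sorted (pvBuildB d).1.keys (fun k => k) true).foldl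
      (pvStepB (pvBuildB d).1) (d, (pvBuildB d).2)).1
  rw [hfst, hsnd]
  have hbuild : pvBuildPositions d = (PySem.List.enumerate d 0).foldl pvBStep PySem.Dict.empty := rfl
  have hnd : (pvBuildPositions d).keys.Nodup := by
    rw [hbuild]
    exact pvBuild_keys_nodup _ _ (by rw [PySem.Dict.keys_empty]; exact List.nodup_nil)
  have hks : ∀ k ∈ PySem.List.sorted (pvBuildPositions d).keys (fun k => k) true,
      k ∈ (pvBuildPositions d).keys := by
    intro k hk
    exact (PySem.List.mem_sorted _ _ _ _).1 hk
  have hgetD : ∀ k : String, k ≠ "." → (pvBuildPositions d).getD k []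
      = ((PySem.List.enumerate d 0).filter (fun pb => pb.2 == k)).map (·.1) := by
    intro k hk
    rw [hbuild, pvBuild_getD _ _ _ hk, PySem.Dict.getD_empty]
    simp
  symm
  rw [show ((PySem.List.sorted (pvBuildPositions d).keys (fun k => k) true).foldl
      (pvStepB (pvBuildPositions d)) (d, pvFP d 0)).1
    = (PySem.List.sorted (pvBuildPositions d).keys (fun k => k) true).foldl
      (pvStepA (pvBuildPositions d)) d from ?_]
  apply pvLoop_eq
  · exact ((PySem.List.sorted_perm _ _ _).symm).nodup hnd
  · intro k hkmem
    have hkk := hks k hkmem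
    rw [hbuild] at hkk
    rcases pvBuild_keys_sub _ _ _ hkk with h | ⟨hkdot, pb, hpb, hpb2⟩
    · rw [PySem.Dict.keys_empty] at h; exact absurd h (List.not_mem_nil)
    · refine ⟨hkdot, ?_, ?_⟩
      · rw [hgetD k hkdot]
        apply List.ne_nil_of_mem (a := pb.1)
        exact List.mem_map_of_mem (List.mem_filter.2 ⟨hpb, by simpa using hpb2⟩)
      · rw [hgetD k hkdot]
        apply List.Pairwise.map
        · intro a b hab
          exact hab
        · exact (PySem.List.pairwise_lt_enumerate d 0).filter _
  · intro k hkmem p hp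
    have hkk := hks k hkmem
    rw [hbuild] at hkk
    rcases pvBuild_keys_sub _ _ _ hkk with h | ⟨hkdot, _, _, _⟩
    · rw [PySem.Dict.keys_empty] at h; exact absurd h (List.not_mem_nil)
    rw [hgetD k hkdot] at hp
    obtain ⟨pb, hpbf, hpb1⟩ := List.mem_map.1 hp
    obtain ⟨hpbe, hpbk⟩ := List.mem_filter.1 hpbf
    obtain ⟨kk, hkklt, hpbeq⟩ := (PySem.List.mem_enumerate_iff _ _ _).1 hpbe
    have hp1 : p = (kk : Int) := by rw [← hpb1, hpbeq]; simp
    have hdk : d[kk] = k := by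
      have : pb.2 = k := by simpa using hpbk
      rw [hpbeq] at this
      simpa using this
    refine ⟨by omega, by omega, ?_⟩
    rw [show p.toNat = kk by omega]
    rw [List.getElem!_eq_getElem?_getD, List.getElem?_eq_getElem hkklt]
    simpa using hdk

-- ===== VERDICT (by name: the statement is the Claim_ definition above) =====
theorem compact_disk_v2_spec : Claim_equal_compact_disk_v2 := by
  intro disk_blocks _
  exact pv_final disk_blocks
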